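-- pv_equiv track=rewrite | github.com/fresvel/TFM_MIAR | Recursos/SRL/síntesis/python/d2_phase1.py | build_synthesis_note_purpose
-- ===== SOURCE A (Python) =====
-- def map_purpose_token(token: str) -> str:
--     mapping = {
--         "Other:Sensor_Calibration_Adjustment": "Operational_Optimization",
--         "Other:Filter_Replacement_Support": "Operational_Optimization",
--         "Other:HVAC_Power_Optimization": "Operational_Optimization",
--         "Route_Optimization": "Operational_Optimization",
--     }
--     return mapping.get(token, token)
--
-- def build_synthesis_note_purpose(tokens_raw: list[str], tokens_norm: list[str]) -> str:
--     variant_tokens = [t for t in tokens_raw if t != map_purpose_token(t)]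
--     variant_tokens = list(dict.fromkeys(variant_tokens))
--     if not variant_tokens:
--         return ""
--
--     parts: list[str] = []
--     for token in variant_tokens:
--         if token == "Other:Sensor_Calibration_Adjustment":
--             parts.append("Sensor_Calibration_Adjustment se integra en Operational_Optimization")
--         elif token == "Other:Filter_Replacement_Support":
--             parts.append("Filter_Replacement_Support se integra en Operational_Optimization")
--         elif token == "Other:HVAC_Power_Optimization":
--             parts.append("HVAC_Power_Optimization se integra en Operational_Optimization")
--         elif token == "Route_Optimization":
--             parts.append("Route_Optimization se integra en Operational_Optimization")
--     return "; ".join(parts)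
-- ===== SOURCE B (Python) =====
-- def map_purpose_token(token: str) -> str:
--     mapping = {
--         "Other:Sensor_Calibration_Adjustment": "Operational_Optimization",
--         "Other:Filter_Replacement_Support": "Operational_Optimization",
--         "Other:HVAC_Power_Optimization": "Operational_Optimization",
--         "Route_Optimization": "Operational_Optimization",
--     }
--     return mapping.get(token, token)
--
-- def build_synthesis_note_purpose(tokens_raw: list[str], tokens_norm: list[str]) -> str:
--     variant_tokens = list(dict.fromkeys(t for t in tokens_raw if t != map_purpose_token(t)))
--     return "; ".join(
--         t.removeprefix("Other:") + " se integra en " + map_purpose_token(t)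
--         for t in variant_tokens
--     )
-- ===== Notes on version B (the rewrite author's own statement) =====
-- stated objective: simpler
-- what changed: The four-branch if/elif cascade with hardcoded sentences (and the early empty-string return) is replaced by one uniform formula deriving each sentence from the mapping itself: strip the 'Other:' prefix and join with the mapped target; joining an empty list already yields ''.
import Mathlib
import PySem

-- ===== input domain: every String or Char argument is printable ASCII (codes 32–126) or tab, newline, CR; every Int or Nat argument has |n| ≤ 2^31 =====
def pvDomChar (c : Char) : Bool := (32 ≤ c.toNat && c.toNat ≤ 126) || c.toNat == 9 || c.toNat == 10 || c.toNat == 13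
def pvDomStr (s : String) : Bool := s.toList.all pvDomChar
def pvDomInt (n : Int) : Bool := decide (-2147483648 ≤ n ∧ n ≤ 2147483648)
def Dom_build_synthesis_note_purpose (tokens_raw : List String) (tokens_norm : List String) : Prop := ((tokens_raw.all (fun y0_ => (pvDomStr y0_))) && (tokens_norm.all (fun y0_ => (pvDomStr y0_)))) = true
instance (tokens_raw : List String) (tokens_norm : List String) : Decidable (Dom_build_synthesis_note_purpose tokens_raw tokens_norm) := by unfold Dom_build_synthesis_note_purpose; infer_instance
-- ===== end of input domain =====

-- B replaces the four-branch if/elif cascade (and early empty return) by one uniform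
-- formula per token: removeprefix("Other:") ++ " se integra en " ++ map_purpose_token(t); simpler.


-- ===== PORT A =====
-- shared module helper map_purpose_token; dict.get with four distinct literal keys = if-chain
def mapPurposeToken (token : String) : String :=
  if token = "Other:Sensor_Calibration_Adjustment" then "Operational_Optimization"
  else if token = "Other:Filter_Replacement_Support" then "Operational_Optimization"
  else if token = "Other:HVAC_Power_Optimization" then "Operational_Optimization"
  else if token = "Route_Optimization" then "Operational_Optimization"
  else token

-- list(dict.fromkeys(xs)): keep first occurrence of each element
def pyDedup (xs : List String) : List String :=
  xs.foldl (fun acc t => if t ∈ acc then acc else acc ++ [t]) []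

def build_synthesis_note_purpose (tokens_raw : List String) (tokens_norm : List String) : String :=
  let variant_tokens := tokens_raw.filter (fun t => t ≠ mapPurposeToken t)
  let variant_tokens := pyDedup variant_tokens
  if variant_tokens = [] then "" else
  let parts : List String := variant_tokens.foldl (fun parts token =>
    if token = "Other:Sensor_Calibration_Adjustment" then
      parts ++ ["Sensor_Calibration_Adjustment se integra en Operational_Optimization"]
    else if token = "Other:Filter_Replacement_Support" then
      parts ++ ["Filter_Replacement_Support se integra en Operational_Optimization"]
    else if token = "Other:HVAC_Power_Optimization" then
      parts ++ ["HVAC_Power_Optimization se integra en Operational_Optimization"]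
    else if token = "Route_Optimization" then
      parts ++ ["Route_Optimization se integra en Operational_Optimization"]
    else parts) []
  PySem.Str.join "; " parts

-- ===== PORT B =====
-- t.removeprefix("Other:"), ported by hand (exact: drops the 6-char prefix when present)
def removePrefixOther (t : String) : String :=
  if PySem.Str.startswith t "Other:" then String.ofList (t.toList.drop 6) else t

-- Python '+' on str, exact on code points
def strAdd (a b : String) : String := String.ofList (a.toList ++ b.toList)

def build_synthesis_note_purpose_alt (tokens_raw : List String) (tokens_norm : List String) : String :=
  let variant_tokens := pyDedup (tokens_raw.filter (fun t => t ≠ mapPurposeToken t))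
  PySem.Str.join "; "
    (variant_tokens.map (fun t =>
      strAdd (strAdd (removePrefixOther t) " se integra en ") (mapPurposeToken t)))

-- ===== PRECONDITION & SPEC =====
def Spec_build_synthesis_note_purpose (tokens_raw : List String) (tokens_norm : List String) (out : String) : Prop := out = build_synthesis_note_purpose_alt tokens_raw tokens_norm
instance (tokens_raw : List String) (tokens_norm : List String) (out : String) : Decidable (Spec_build_synthesis_note_purpose tokens_raw tokens_norm out) := by unfold Spec_build_synthesis_note_purpose; infer_instance

-- ===== CLAIM (what is proved, stated in full; the proofs are below) =====
def Claim_equal_build_synthesis_note_purpose : Prop := ∀ (tokens_raw : List String) (tokens_norm : List String), Dom_build_synthesis_note_purpose tokens_raw tokens_norm → Spec_build_synthesis_note_purpose tokens_raw tokens_norm (build_synthesis_note_purpose tokens_raw tokens_norm)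

-- ===== LEMMAS AND PROOFS =====

-- B's per-token sentence
def sentenceB (t : String) : String :=
  strAdd (strAdd (removePrefixOther t) " se integra en ") (mapPurposeToken t)

-- A's per-token contribution to parts
def stepA (t : String) : List String :=
  if t = "Other:Sensor_Calibration_Adjustment" then
    ["Sensor_Calibration_Adjustment se integra en Operational_Optimization"]
  else if t = "Other:Filter_Replacement_Support" then
    ["Filter_Replacement_Support se integra en Operational_Optimization"]
  else if t = "Other:HVAC_Power_Optimization" then
    ["HVAC_Power_Optimization se integra en Operational_Optimization"]
  else if t = "Route_Optimization" then
    ["Route_Optimization se integra en Operational_Optimization"]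
  else []

theorem stepA_eq (t : String) (h : t ≠ mapPurposeToken t) : stepA t = [sentenceB t] := by
  unfold mapPurposeToken at h
  unfold stepA sentenceB
  split_ifs at h with h1 h2 h3 h4
  · subst h1; decide
  · subst h2; decide
  · subst h3; decide
  · subst h4; decide
  · exact absurd rfl h

theorem foldl_stepA (xs : List String) (acc : List String)
    (h : ∀ t ∈ xs, t ≠ mapPurposeToken t) :
    xs.foldl (fun parts t => parts ++ stepA t) acc = acc ++ xs.map sentenceB := by
  induction xs generalizing acc with
  | nil => simp
  | cons x xs ih =>
    simp only [List.foldl_cons, List.map_cons]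
    rw [stepA_eq x (h x (List.mem_cons_self)), ih _ (fun t ht => h t (List.mem_cons_of_mem _ ht))]
    simp

theorem mem_pyDedup {t : String} {xs : List String} (h : t ∈ pyDedup xs) : t ∈ xs := by
  unfold pyDedup at h
  suffices H : ∀ (xs acc : List String), t ∈ xs.foldl (fun acc t => if t ∈ acc then acc else acc ++ [t]) acc → t ∈ acc ∨ t ∈ xs by
    rcases H xs [] h with h' | h'
    · simp at h'
    · exact h'
  intro xs
  induction xs with
  | nil => intro acc h; simp_all
  | cons x xs ih =>
    intro acc h
    simp only [List.foldl_cons] at h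
    rcases ih _ h with h' | h'
    · split_ifs at h' with hx
      · exact Or.inl h'
      · rcases List.mem_append.mp h' with h'' | h''
        · exact Or.inl h''
        · simp at h''; subst h''; simp
    · simp [h']

theorem build_synthesis_note_purpose_eq (tokens_raw tokens_norm : List String) :
    build_synthesis_note_purpose tokens_raw tokens_norm
      = build_synthesis_note_purpose_alt tokens_raw tokens_norm := by
  unfold build_synthesis_note_purpose build_synthesis_note_purpose_alt
  simp only []
  set vt := pyDedup (tokens_raw.filter (fun t => t ≠ mapPurposeToken t)) with hvt
  have hmem : ∀ t ∈ vt, t ≠ mapPurposeToken t := by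
    intro t ht
    have := mem_pyDedup (hvt ▸ ht)
    exact of_decide_eq_true (List.mem_filter.mp this).2
  have hfold : vt.foldl (fun parts t => parts ++ stepA t) [] = vt.map sentenceB :=
    foldl_stepA vt [] hmem
  by_cases hnil : vt = []
  · simp [hnil, PySem.Str.join]
  · simp only [if_neg hnil]
    have hf : (fun (parts : List String) token =>
        if token = "Other:Sensor_Calibration_Adjustment" then
          parts ++ ["Sensor_Calibration_Adjustment se integra en Operational_Optimization"]
        else if token = "Other:Filter_Replacement_Support" then
          parts ++ ["Filter_Replacement_Support se integra en Operational_Optimization"]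
        else if token = "Other:HVAC_Power_Optimization" then
          parts ++ ["HVAC_Power_Optimization se integra en Operational_Optimization"]
        else if token = "Route_Optimization" then
          parts ++ ["Route_Optimization se integra en Operational_Optimization"]
        else parts)
        = (fun parts t => parts ++ stepA t) := by
      funext parts t
      simp only [stepA]
      split_ifs <;> simp
    rw [hf, hfold]
    rfl
-- ===== VERDICT (by name: the statement is the Claim_ definition above) =====
theorem build_synthesis_note_purpose_spec : Claim_equal_build_synthesis_note_purpose := by
  intro tokens_raw tokens_norm _
  unfold Spec_build_synthesis_note_purpose
  exact build_synthesis_note_purpose_eq tokens_raw tokens_norm
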